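-- pv_equiv track=rewrite | github.com/rajasekhar02/reading-x-source-code | Complete Reference/Algorithms/striver/6-3-2023_leetcode_contest_2.py | solution
-- ===== SOURCE A (Python) =====
-- def solution(a):
--     b = []
--
--     for i in range(0, (len(a) >> 1)):
--         b.append(a[i])
--         b.append(a[len(a) - i - 1])
--     if len(a) & 1:
--         b.append(a[(len(a) >> 1)])
--
--     # conditions to check whether the list is sorted or not
--     # list contains values in range 10^-9 to 10^9
--     for i in range(1, len(b)):
--         # if both numbers are negative then if the i-1 th element
--         # greater than or equal i th element then list is not in sorted order
--         if b[i - 1] < 0 and b[i] < 0 and b[i - 1] >= b[i]: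
--             return False
--         # otherwise i-1 th element greater than or equals to the i th element
--         # then list is not in sorted order
--         if b[i - 1] >= b[i]:
--             return False
--     return True
-- ===== SOURCE B (Python) =====
-- def solution(a):
--     n = len(a)
--     prev = None
--     for i in range(n // 2):
--         x = a[i]
--         y = a[n - 1 - i]
--         if (prev is not None and prev >= x) or x >= y:
--             return False
--         prev = y
--     if n % 2 == 1 and prev is not None and prev >= a[n // 2]:
--         return False
--     return True
-- ===== Notes on version B (the rewrite author's own statement) =====
-- stated objective: simpler
-- what changed: B never materializes the interleaved list: it streams the interleaved order in one fused O(1)-space pass keeping only the previous emitted value, with an early False exit, where A first builds the whole list b and then runs a second index loop (with a redundant both-negative branch) over it.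
import Mathlib
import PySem

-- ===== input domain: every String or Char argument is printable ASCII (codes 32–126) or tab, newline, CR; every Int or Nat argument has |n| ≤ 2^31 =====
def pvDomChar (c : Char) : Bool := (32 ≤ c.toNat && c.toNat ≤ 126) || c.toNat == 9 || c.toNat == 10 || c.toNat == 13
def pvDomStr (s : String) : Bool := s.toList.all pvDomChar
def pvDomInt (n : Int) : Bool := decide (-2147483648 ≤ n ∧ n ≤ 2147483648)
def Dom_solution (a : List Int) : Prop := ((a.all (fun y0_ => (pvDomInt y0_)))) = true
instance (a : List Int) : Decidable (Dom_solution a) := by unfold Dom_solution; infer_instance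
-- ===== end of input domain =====

-- B streams the interleaved order keeping only a `prev` value (no intermediate list, one fused pass with early exit); objective: simpler.

-- ===== PORT A =====
-- second loop of A: 'for i in range(1, len(b)): if … return False' as recursion over the index list
def solutionCheck (b : List Int) : List Int → Bool
  | [] => true
  | i :: rest =>
    if PySem.List.pyGetD b (i - 1) 0 < 0 ∧ PySem.List.pyGetD b i 0 < 0 ∧
        PySem.List.pyGetD b (i - 1) 0 ≥ PySem.List.pyGetD b i 0 then false
    else if PySem.List.pyGetD b (i - 1) 0 ≥ PySem.List.pyGetD b i 0 then false
    else solutionCheck b rest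

def solution (a : List Int) : Bool :=
  let b0 : List Int :=
    (PySem.List.pyRange 0 (((a.length : Int)) >>> 1) 1).foldl
      (fun acc i => acc ++ [PySem.List.pyGetD a i 0, PySem.List.pyGetD a ((a.length : Int) - i - 1) 0]) []
  let b : List Int :=
    if PySem.Int.band (a.length : Int) 1 ≠ 0 then b0 ++ [PySem.List.pyGetD a ((a.length : Int) >>> 1) 0] else b0
  solutionCheck b (PySem.List.pyRange 1 (b.length : Int) 1)

-- ===== PORT B =====
-- 'prev is not None and prev >= x' as a Bool test on the Option state
def prevGE (prev : Option Int) (x : Int) : Bool :=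
  match prev with
  | some p => p ≥ x
  | none => false

-- B's fused loop: state is `prev : Option Int`; the early 'return False' is returning false
def solutionAltLoop (a : List Int) (prev : Option Int) : List Int → Bool
  | [] =>
    if (PySem.Int.mod (a.length : Int) 2 == 1) &&
        prevGE prev (PySem.List.pyGetD a (PySem.Int.floordiv (a.length : Int) 2) 0) then false
    else true
  | i :: rest =>
    let x := PySem.List.pyGetD a i 0
    let y := PySem.List.pyGetD a ((a.length : Int) - 1 - i) 0
    if prevGE prev x || decide (x ≥ y) then false
    else solutionAltLoop a (some y) rest

def solution_alt (a : List Int) : Bool :=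
  solutionAltLoop a none (PySem.List.pyRange 0 (PySem.Int.floordiv (a.length : Int) 2) 1)

-- ===== PRECONDITION & SPEC =====
def Spec_solution (a : List Int) (out : Bool) : Prop := out = solution_alt a
instance (a : List Int) (out : Bool) : Decidable (Spec_solution a out) := by unfold Spec_solution; infer_instance

-- ===== CLAIM (what is proved, stated in full; the proofs are below) =====
def Claim_equal_solution : Prop := ∀ (a : List Int), Dom_solution a → Spec_solution a (solution a)

-- ===== LEMMAS AND PROOFS =====

-- "strictly increasing given an optional previous element" — the common characterisation
def chk (prev : Option Int) : List Int → Bool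
  | [] => true
  | x :: xs => if prevGE prev x then false else chk (some x) xs

-- A's check loop computes chk
theorem solutionCheck_eq_chk (b : List Int) (j : Nat) (hj : 1 ≤ j) :
    solutionCheck b (PySem.List.pyRange (j : Int) (b.length : Int) 1) = chk b[j-1]? (b.drop j) := by
  by_cases h : j < b.length
  · have hcons : PySem.List.pyRange (j : Int) (b.length : Int) 1
        = (j : Int) :: PySem.List.pyRange ((j : Int) + 1) (b.length : Int) 1 :=
      PySem.List.pyRange_one_cons (by exact_mod_cast h)
    rw [hcons]
    have h1 : j - 1 < b.length := by omega
    have hg1 : PySem.List.pyGetD b ((j : Int) - 1) 0 = b[j-1] := by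
      have he : ((j : Int) - 1) = ((j - 1 : Nat) : Int) := by omega
      rw [he, PySem.List.pyGetD_natCast]; simp [List.getD, h1]
    have hg2 : PySem.List.pyGetD b (j : Int) 0 = b[j] := by
      rw [PySem.List.pyGetD_natCast]; simp [List.getD, h]
    have ih := solutionCheck_eq_chk b (j + 1) (by omega)
    have hpush : ((j + 1 : Nat) : Int) = ((j : Int) + 1) := by push_cast; ring
    rw [hpush] at ih
    have hdrop : b.drop j = b[j] :: b.drop (j + 1) := List.drop_eq_getElem_cons h
    have hget : b[j-1]? = some b[j-1] := List.getElem?_eq_getElem h1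
    have hget2 : b[(j+1)-1]? = some b[j] := by
      simp only [Nat.add_sub_cancel]; exact List.getElem?_eq_getElem h
    rw [hget2] at ih
    simp only [solutionCheck, hg1, hg2, ih, hdrop, hget, chk, prevGE]
    by_cases hge : b[j-1] ≥ b[j]
    · simp [hge]
    · simp [hge]
  · have hnil : PySem.List.pyRange (j : Int) (b.length : Int) 1 = [] :=
      PySem.List.pyRange_one_eq_nil (by exact_mod_cast Nat.le_of_not_lt h)
    have hdrop : b.drop j = [] := List.drop_eq_nil_of_le (Nat.le_of_not_lt h)
    rw [hnil, hdrop]; simp [solutionCheck, chk]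
termination_by b.length - j

-- chk ignores the first element's value when prev = none
theorem chk_none (b : List Int) : chk none b = chk b[0]? (b.drop 1) := by
  cases b with
  | nil => simp [chk]
  | cons x xs => simp [chk, prevGE]

-- the tail of the interleaved stream from index i on
def seg (a : List Int) (i : Int) : List Int :=
  (PySem.List.pyRange i (PySem.Int.floordiv (a.length : Int) 2) 1).flatMap
    (fun k => [PySem.List.pyGetD a k 0, PySem.List.pyGetD a ((a.length : Int) - k - 1) 0]) ++
  (if PySem.Int.mod (a.length : Int) 2 = 1
   then [PySem.List.pyGetD a (PySem.Int.floordiv (a.length : Int) 2) 0] else [])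

-- chk on a singleton / fixing the unused-h1 linter
theorem chk_one (prev : Option Int) (x : Int) : chk prev [x] = !prevGE prev x := by
  by_cases h : prevGE prev x = true
  · simp [chk, h]
  · simp [chk, h]

-- one fused step of chk over two emitted elements
theorem chk_two (prev : Option Int) (x y : Int) (l : List Int) :
    chk prev (x :: y :: l) = if prevGE prev x || decide (x ≥ y) then false else chk (some y) l := by
  by_cases h1 : prevGE prev x = true
  · simp [chk, h1]
  · by_cases h2 : x ≥ y
    · simp [chk, prevGE, h2]
    · simp [chk, prevGE, h2]

-- B's loop computes chk on the remaining stream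
theorem solutionAltLoop_eq_chk (a : List Int) (prev : Option Int) (i : Nat) :
    solutionAltLoop a prev (PySem.List.pyRange (i : Int) (PySem.Int.floordiv (a.length : Int) 2) 1)
      = chk prev (seg a i) := by
  by_cases h : (i : Int) < PySem.Int.floordiv (a.length : Int) 2
  · have hcons := PySem.List.pyRange_one_cons h (b := PySem.Int.floordiv (a.length : Int) 2)
    have ih := solutionAltLoop_eq_chk a
      (some (PySem.List.pyGetD a ((a.length : Int) - 1 - (i : Int)) 0)) (i + 1)
    have hpush : ((i + 1 : Nat) : Int) = ((i : Int) + 1) := by push_cast; ring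
    rw [hpush] at ih
    unfold seg
    rw [hcons, List.flatMap_cons, List.append_assoc]
    simp only [solutionAltLoop, ih]
    have hidx : (a.length : Int) - (i : Int) - 1 = (a.length : Int) - 1 - (i : Int) := by ring
    rw [hidx]
    simp only [List.cons_append, List.nil_append]
    rw [chk_two]
    rfl
  · have hnil : PySem.List.pyRange (i : Int) (PySem.Int.floordiv (a.length : Int) 2) 1 = [] :=
      PySem.List.pyRange_one_eq_nil (le_of_not_gt h)
    unfold seg
    rw [hnil]
    simp only [solutionAltLoop, List.flatMap_nil, List.nil_append]
    by_cases hodd : PySem.Int.mod (a.length : Int) 2 = 1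
    · rw [if_pos hodd, chk_one]
      simp
      intro hd
      rw [← PySem.Int.mod_eq_zero_iff_dvd] at hd
      rw [hd] at hodd
      exact absurd hodd (by norm_num)
    · rw [if_neg hodd]
      have h0 : PySem.Int.mod (a.length : Int) 2 = 0 :=
        (PySem.Int.mod_two_eq (a.length : Int)).resolve_right hodd
      simp [chk]
      exact Or.inl ((PySem.Int.mod_eq_zero_iff_dvd (a.length : Int) 2).mp h0)
termination_by (PySem.Int.floordiv (a.length : Int) 2 - (i : Int)).toNat
decreasing_by
  omega

-- shift/right on a Nat cast is floor division by 2
theorem shiftRight_one_natCast (m : Nat) : ((m : Int) >>> 1) = PySem.Int.floordiv (m : Int) 2 := by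
  rw [show ((2:Int)) = ((2:Nat):Int) by norm_num, PySem.Int.floordiv_natCast,
      show ((m : Int) >>> 1) = ((m >>> 1 : Nat) : Int) from Int.mem_toNat?.mp rfl,
      Nat.shiftRight_one]

-- A's interleaved list is seg a 0
theorem solution_b_eq_seg (a : List Int) :
    (if PySem.Int.band (a.length : Int) 1 ≠ 0
     then ((PySem.List.pyRange 0 (((a.length : Int)) >>> 1) 1).foldl
      (fun acc i => acc ++ [PySem.List.pyGetD a i 0, PySem.List.pyGetD a ((a.length : Int) - i - 1) 0]) [])
      ++ [PySem.List.pyGetD a ((a.length : Int) >>> 1) 0]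
     else ((PySem.List.pyRange 0 (((a.length : Int)) >>> 1) 1).foldl
      (fun acc i => acc ++ [PySem.List.pyGetD a i 0, PySem.List.pyGetD a ((a.length : Int) - i - 1) 0]) []))
    = seg a 0 := by
  rw [PySem.List.foldl_append_eq_flatMap, List.nil_append]
  unfold seg
  rw [shiftRight_one_natCast, PySem.Int.band_one]
  by_cases hodd : PySem.Int.mod (a.length : Int) 2 = 1
  · rw [if_pos (by rw [hodd]; norm_num), if_pos hodd]
  · have h0 := (PySem.Int.mod_two_eq ((a.length : Int))).resolve_right hodd
    rw [if_neg (by rw [h0]; simp), if_neg hodd, List.append_nil]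

-- ===== VERDICT (by name: the statement is the Claim_ definition above) =====
theorem solution_spec : Claim_equal_solution := by
  intro a _
  unfold Spec_solution solution solution_alt
  simp only []
  rw [solution_b_eq_seg a]
  have hA := solutionCheck_eq_chk (seg a 0) 1 (le_refl 1)
  rw [show ((1:Nat):Int) = (1:Int) from rfl] at hA
  rw [hA, ← chk_none]
  have hB := solutionAltLoop_eq_chk a none 0
  rw [show ((0:Nat):Int) = (0:Int) from rfl] at hB
  rw [hB]
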